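-- pv_equiv track=rewrite | github.com/Liaoqitian/Exam-Generation | questions/python/soft-dictionary-big/server.py | countBlankSpaces
-- ===== SOURCE A (Python) =====
-- def countBlankSpaces(submitted_answer):
--     count = 0
--     for char in submitted_answer:
--         if char == ' ':
--             count += 1
--         else:
--             break
--     return count
-- ===== SOURCE B (Python) =====
-- def countBlankSpaces(submitted_answer):
--     # closed form: number of leading ' ' chars = total length minus length after
--     # stripping leading spaces (lstrip(' ') strips only the space character)
--     return len(submitted_answer) - len(submitted_answer.lstrip(' '))
-- ===== Notes on version B (the rewrite author's own statement) =====
-- stated objective: idiomatic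
-- what changed: Replaced the explicit counting loop with early break by the closed-form len(s) - len(s.lstrip(' ')).
import Mathlib
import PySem

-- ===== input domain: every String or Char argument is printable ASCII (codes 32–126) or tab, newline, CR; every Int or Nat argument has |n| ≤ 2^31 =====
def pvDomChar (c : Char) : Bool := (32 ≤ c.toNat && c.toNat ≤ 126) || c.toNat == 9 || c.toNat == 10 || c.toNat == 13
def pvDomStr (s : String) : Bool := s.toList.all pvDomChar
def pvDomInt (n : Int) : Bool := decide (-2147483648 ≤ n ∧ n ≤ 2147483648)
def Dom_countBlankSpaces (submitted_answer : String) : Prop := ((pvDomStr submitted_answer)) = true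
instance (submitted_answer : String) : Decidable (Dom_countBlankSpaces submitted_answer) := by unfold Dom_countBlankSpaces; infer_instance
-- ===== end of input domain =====

-- B replaces A's counting loop with the closed form len(s) - len(s.lstrip(' ')) (idiomatic, no loop).

-- ===== PORT A =====
-- A's loop: count leading ' ' chars, break at the first non-space.
def countBlankSpacesGo : List Char → Int → Int
  | [], count => count
  | ch :: rest, count => if ch = ' ' then countBlankSpacesGo rest (count + 1) else count

def countBlankSpaces (submitted_answer : String) : Int :=
  countBlankSpacesGo submitted_answer.toList 0

-- ===== PORT B =====
-- Source B: len(s) - len(s.lstrip(' ')).  str.lstrip(' ') is exactly dropWhile (· == ' ') on the code points.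
def countBlankSpaces_alt (submitted_answer : String) : Int :=
  PySem.Str.len submitted_answer
    - (submitted_answer.toList.dropWhile (fun ch => ch == ' ')).length

-- ===== PRECONDITION & SPEC =====
def Spec_countBlankSpaces (submitted_answer : String) (out : Int) : Prop := out = countBlankSpaces_alt submitted_answer
instance (submitted_answer : String) (out : Int) : Decidable (Spec_countBlankSpaces submitted_answer out) := by unfold Spec_countBlankSpaces; infer_instance

-- ===== CLAIM (what is proved, stated in full; the proofs are below) =====
def Claim_equal_countBlankSpaces : Prop := ∀ (submitted_answer : String), Dom_countBlankSpaces submitted_answer → Spec_countBlankSpaces submitted_answer (countBlankSpaces submitted_answer)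

-- ===== LEMMAS AND PROOFS =====
theorem countBlankSpacesGo_eq (l : List Char) :
    ∀ count : Int, countBlankSpacesGo l count
      = count + (l.takeWhile (fun ch => ch == ' ')).length := by
  induction l with
  | nil => intro count; simp [countBlankSpacesGo]
  | cons ch rest ih =>
      intro count
      by_cases h : ch = ' '
      · simp [countBlankSpacesGo, h, ih]; omega
      · simp [countBlankSpacesGo, h]

-- ===== VERDICT (by name: the statement is the Claim_ definition above) =====
theorem countBlankSpaces_spec : Claim_equal_countBlankSpaces := by
  intro s _
  unfold Spec_countBlankSpaces countBlankSpaces countBlankSpaces_alt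
  rw [countBlankSpacesGo_eq]
  have h := congrArg List.length
    (List.takeWhile_append_dropWhile (p := fun ch => ch == ' ') (l := s.toList))
  rw [List.length_append] at h
  simp only [String.length_toList] at h
  simp [PySem.Str.len_eq]
  omega
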